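-- pv_equiv track=rewrite | github.com/AdeebaRafi/MIT_Contest | codeforces/cf.py | can_split_into_repetitive
-- ===== SOURCE A (Python) =====
-- def is_repetitive_unit(s):
--     # Check if a single unit is repetitive (M followed by one or more IT)
--     if len(s) < 3 or s[0] != 'M':  # Minimum length is 3 (MIT)
--         return False
--     i = 1
--     while i < len(s) - 1:
--         if s[i] != 'I' or s[i + 1] != 'T':
--             return False
--         i += 2
--     return i == len(s)  # Must end exactly after IT pattern
--
-- def can_split_into_repetitive(s):
--     n = len(s)
--     # Dynamic programming array to track if we can split string up to index i
--     dp = [False] * (n + 1)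
--     dp[0] = True  # Empty string can be split
--
--     # Try all possible splits
--     for i in range(1, n + 1):
--         # Try all possible lengths of last repetitive unit
--         j = 3  # Minimum length of repetitive unit (MIT)
--         while j <= i and j <= n:
--             if dp[i - j] and is_repetitive_unit(s[i - j:i]):
--                 dp[i] = True
--                 break
--             j += 2  # Next possible length (adding IT)
--
--     return dp[n]
-- ===== SOURCE B (Python) =====
-- def can_split_into_repetitive(s):
--     # Single-pass DFA for the pattern (M(IT)+)* :
--     # 0 = at a unit boundary (start), 1 = seen 'M', 2 = expecting 'T',
--     # 3 = just finished M(IT)+ (may end, extend with 'I', or start a new unit), -1 = dead.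
--     state = 0
--     for c in s:
--         if state == 0:
--             state = 1 if c == 'M' else -1
--         elif state == 1:
--             state = 2 if c == 'I' else -1
--         elif state == 2:
--             state = 3 if c == 'T' else -1
--         elif state == 3:
--             state = 2 if c == 'I' else (1 if c == 'M' else -1)
--         # state -1 is absorbing
--     return state == 0 or state == 3
-- ===== Notes on version B (the rewrite author's own statement) =====
-- stated objective: faster
-- what changed: Replaced the O(n^2)-table dynamic programming (for each prefix, scan all odd unit lengths and re-verify the unit character by character) by a single left-to-right pass of a 5-state DFA recognising (M(IT)+)*.
import Mathlib
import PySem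

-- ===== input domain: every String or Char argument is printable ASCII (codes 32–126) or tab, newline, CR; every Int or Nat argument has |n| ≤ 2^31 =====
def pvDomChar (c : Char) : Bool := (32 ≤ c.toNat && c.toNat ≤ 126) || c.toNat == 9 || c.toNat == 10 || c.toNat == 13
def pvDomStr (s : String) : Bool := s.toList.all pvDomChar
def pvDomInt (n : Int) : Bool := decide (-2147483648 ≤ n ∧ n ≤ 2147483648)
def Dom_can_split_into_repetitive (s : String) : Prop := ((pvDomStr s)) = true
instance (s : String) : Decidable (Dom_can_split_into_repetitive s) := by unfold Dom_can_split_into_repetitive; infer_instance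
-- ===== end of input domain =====

-- B replaces A's dynamic programming over all odd candidate unit lengths (quadratically many
-- re-verified substrings) by a single left-to-right pass of a 5-state DFA for the pattern (M(IT)+)*.

-- ===== PORT A =====
def pvUnitLoop (l : List Char) (i : Nat) : Bool :=
  if i + 1 < l.length then
    if l.getD i ' ' ≠ 'I' ∨ l.getD (i + 1) ' ' ≠ 'T' then false
    else pvUnitLoop l (i + 2)
  else i == l.length
termination_by l.length - i
decreasing_by omega

def pvIsRepUnit (l : List Char) : Bool :=
  if l.length < 3 ∨ l.getD 0 ' ' ≠ 'M' then false else pvUnitLoop l 1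

def pvInnerLoop (l : List Char) (n i : Nat) (dp : List Bool) (j : Nat) : List Bool :=
  if j ≤ i ∧ j ≤ n then
    if dp.getD (i - j) false && pvIsRepUnit (PySem.List.slice l (some ((i - j : Nat) : Int)) (some (i : Int))) then
      dp.set i true
    else pvInnerLoop l n i dp (j + 2)
  else dp
termination_by i + 1 - j
decreasing_by omega

def can_split_into_repetitive (s : String) : Bool :=
  let l := s.toList
  let n := l.length
  let dp := (List.replicate (n + 1) false).set 0 true
  let dp := (List.range' 1 n).foldl (fun dp i => pvInnerLoop l n i dp 3) dp
  dp.getD n false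

-- ===== PORT B =====
def pvDfaStep (st : Int) (c : Char) : Int :=
  if st = 0 then (if c = 'M' then 1 else -1)
  else if st = 1 then (if c = 'I' then 2 else -1)
  else if st = 2 then (if c = 'T' then 3 else -1)
  else if st = 3 then (if c = 'I' then 2 else if c = 'M' then 1 else -1)
  else st

def can_split_into_repetitive_alt (s : String) : Bool :=
  let st := s.toList.foldl pvDfaStep 0
  st == 0 || st == 3

-- ===== PRECONDITION & SPEC =====
def Spec_can_split_into_repetitive (s : String) (out : Bool) : Prop := out = can_split_into_repetitive_alt s
instance (s : String) (out : Bool) : Decidable (Spec_can_split_into_repetitive s out) := by unfold Spec_can_split_into_repetitive; infer_instance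

-- ===== CLAIM (what is proved, stated in full; the proofs are below) =====
def Claim_equal_can_split_into_repetitive : Prop := ∀ (s : String), Dom_can_split_into_repetitive s → Spec_can_split_into_repetitive s (can_split_into_repetitive s)

-- ===== LEMMAS AND PROOFS =====
def pvITs (k : Nat) : List Char :=
  match k with
  | 0 => []
  | k + 1 => 'I' :: 'T' :: pvITs k

def PvIsUnit (u : List Char) : Prop := ∃ k, u = 'M' :: pvITs (k + 1)

inductive PvUnits : List Char → Prop
  | nil : PvUnits []
  | snoc (w u : List Char) : PvUnits w → PvIsUnit u → PvUnits (w ++ u)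

theorem pvITs_length (k : Nat) : (pvITs k).length = 2 * k := by
  induction k with
  | zero => rfl
  | succ k ih => simp [pvITs, ih]; omega

theorem pvITs_append (k : Nat) : pvITs k ++ ['I', 'T'] = pvITs (k + 1) := by
  induction k with
  | zero => rfl
  | succ k ih =>
    show 'I' :: 'T' :: (pvITs k ++ ['I', 'T']) = 'I' :: 'T' :: pvITs (k + 1)
    rw [ih]

theorem pvUnits_last {w : List Char} (h : PvUnits w) (hne : w ≠ []) :
    ∃ v k, PvUnits v ∧ w = v ++ 'M' :: pvITs (k + 1) := by
  cases h with
  | nil => exact absurd rfl hne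
  | snoc v u hv hu =>
    obtain ⟨k, rfl⟩ := hu
    exact ⟨v, k, hv, rfl⟩

theorem pvUnitLoop_iff (l : List Char) (i : Nat) (hi : i ≤ l.length) :
    pvUnitLoop l i = true ↔ ∃ k, l.drop i = pvITs k := by
  generalize hm : l.length - i = m
  have hm' : l.length - i ≤ m := by omega
  clear hm
  induction m generalizing i with
  | zero =>
    have hil : i = l.length := by omega
    rw [pvUnitLoop]
    have h1 : ¬ (i + 1 < l.length) := by omega
    simp only [h1, if_false, beq_iff_eq]
    exact ⟨fun _ => ⟨0, by simp [pvITs, List.drop_eq_nil_iff]; omega⟩, fun _ => hil⟩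
  | succ m ih =>
    by_cases heq : i = l.length
    · rw [pvUnitLoop]
      have h1 : ¬ (i + 1 < l.length) := by omega
      simp only [h1, if_false, beq_iff_eq]
      exact ⟨fun _ => ⟨0, by simp [pvITs, List.drop_eq_nil_iff]; omega⟩, fun _ => heq⟩
    · have hlt : i < l.length := by omega
      rw [pvUnitLoop]
      by_cases h1 : i + 1 < l.length
      · have hdropi : l.drop i = l[i] :: l.drop (i + 1) := List.drop_eq_getElem_cons hlt
        have hdropi1 : l.drop (i + 1) = l[i + 1] :: l.drop (i + 2) := List.drop_eq_getElem_cons h1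
        have hgi : l.getD i ' ' = l[i] := List.getD_eq_getElem l ' ' hlt
        have hgi1 : l.getD (i + 1) ' ' = l[i + 1] := List.getD_eq_getElem l ' ' h1
        simp only [h1, if_true, hgi, hgi1]
        by_cases hIT : l[i] = 'I' ∧ l[i + 1] = 'T'
        · obtain ⟨hI, hT⟩ := hIT
          have hc : ¬ (l[i] ≠ 'I' ∨ l[i + 1] ≠ 'T') := by simp [hI, hT]
          simp only [hc, if_false]
          refine (ih (i + 2) (by omega) (by omega)).trans ?_
          constructor
          · rintro ⟨k, hk⟩
            exact ⟨k + 1, by rw [hdropi, hdropi1, hI, hT, hk]; rfl⟩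
          · rintro ⟨k, hk⟩
            cases k with
            | zero =>
              exfalso
              have := congrArg List.length hk
              simp [pvITs] at this
              omega
            | succ k =>
              refine ⟨k, ?_⟩
              rw [hdropi, hdropi1] at hk
              simp only [pvITs, List.cons.injEq] at hk
              exact hk.2.2
        · have hc : l[i] ≠ 'I' ∨ l[i + 1] ≠ 'T' := by tauto
          simp only [hc, if_true]
          constructor
          · intro h; exact absurd h (by simp)
          · rintro ⟨k, hk⟩
            exfalso
            cases k with
            | zero =>
              have := congrArg List.length hk
              simp [pvITs] at this
              omega
            | succ k =>
              rw [hdropi, hdropi1] at hk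
              simp only [pvITs, List.cons.injEq] at hk
              tauto
      · have hil : i + 1 = l.length := by omega
        simp only [h1, if_false, beq_iff_eq]
        constructor
        · intro h; exact absurd h (by omega)
        · rintro ⟨k, hk⟩
          have := congrArg List.length hk
          rw [pvITs_length] at this
          simp at this
          omega

theorem pvIsRepUnit_iff (u : List Char) : pvIsRepUnit u = true ↔ PvIsUnit u := by
  unfold pvIsRepUnit
  by_cases hc : u.length < 3 ∨ u.getD 0 ' ' ≠ 'M'
  · simp only [hc, if_true]
    constructor
    · intro h; exact absurd h (by simp)
    · rintro ⟨k, rfl⟩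
      exfalso
      rcases hc with h | h
      · simp [pvITs_length] at h; omega
      · exact h (by simp [List.getD])
  · simp only [hc, if_false]
    push Not at hc
    obtain ⟨h3, hM⟩ := hc
    rw [pvUnitLoop_iff u 1 (by omega)]
    constructor
    · rintro ⟨k, hk⟩
      cases k with
      | zero =>
        have := congrArg List.length hk
        simp [pvITs] at this
        omega
      | succ k =>
        refine ⟨k, ?_⟩
        have hu : u = u[0] :: u.drop 1 := by
          simpa using List.drop_eq_getElem_cons (show 0 < u.length by omega)
        have hM' : u[0] = 'M' := by
          rw [List.getD_eq_getElem u ' ' (by omega)] at hM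
          exact hM
        rw [hu, hM', hk]
    · rintro ⟨k, rfl⟩
      exact ⟨k + 1, rfl⟩

theorem pvInnerLoop_ne (l : List Char) (n i : Nat) (dp : List Bool) (j m : Nat) (hm : m ≠ i) :
    (pvInnerLoop l n i dp j).getD m false = dp.getD m false := by
  generalize hfuel : i + 1 - j = f
  have hf : i + 1 - j ≤ f := by omega
  clear hfuel
  induction f generalizing j with
  | zero =>
    rw [pvInnerLoop]
    have : ¬ (j ≤ i ∧ j ≤ n) := by omega
    simp [this]
  | succ f ih =>
    rw [pvInnerLoop]
    by_cases hji : j ≤ i ∧ j ≤ n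
    · simp only [hji, and_self, if_true]
      split
      · simp only [List.getD]
        rw [List.getElem?_set_ne (Ne.symm hm)]
      · exact ih (j + 2) (by omega)
    · simp [hji]

theorem pvInnerLoop_length (l : List Char) (n i : Nat) (dp : List Bool) (j : Nat) :
    (pvInnerLoop l n i dp j).length = dp.length := by
  generalize hfuel : i + 1 - j = f
  have hf : i + 1 - j ≤ f := by omega
  clear hfuel
  induction f generalizing j dp with
  | zero =>
    rw [pvInnerLoop]
    have : ¬ (j ≤ i ∧ j ≤ n) := by omega
    simp [this]
  | succ f ih =>
    rw [pvInnerLoop]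
    by_cases hji : j ≤ i ∧ j ≤ n
    · simp only [hji, and_self, if_true]
      split
      · simp
      · exact ih dp (j + 2) (by omega)
    · simp [hji]

theorem pvInnerLoop_self (l : List Char) (n i : Nat) (dp : List Bool) (j : Nat)
    (hin : i ≤ n) (hlen : dp.length = n + 1) (hfalse : dp.getD i false = false) :
    ((pvInnerLoop l n i dp j).getD i false = true ↔
      ∃ t, j + 2 * t ≤ i ∧ dp.getD (i - (j + 2 * t)) false = true ∧
        pvIsRepUnit (PySem.List.slice l (some ((i - (j + 2 * t) : Nat) : Int)) (some (i : Int))) = true) := by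
  generalize hfuel : i + 1 - j = f
  have hf : i + 1 - j ≤ f := by omega
  clear hfuel
  induction f generalizing j with
  | zero =>
    rw [pvInnerLoop]
    have hno : ¬ (j ≤ i ∧ j ≤ n) := by omega
    simp only [hno, if_false]
    rw [hfalse]
    constructor
    · intro h; exact absurd h (by simp)
    · rintro ⟨t, ht, _⟩; omega
  | succ f ih =>
    rw [pvInnerLoop]
    by_cases hji : j ≤ i ∧ j ≤ n
    · simp only [hji, and_self, if_true]
      by_cases hcond : (dp.getD (i - j) false && pvIsRepUnit (PySem.List.slice l (some ((i - j : Nat) : Int)) (some (i : Int)))) = true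
      · simp only [hcond, if_true]
        constructor
        · intro _
          refine ⟨0, by omega, ?_, ?_⟩
          · simpa using (Bool.and_eq_true _ _ |>.mp hcond).1
          · simpa using (Bool.and_eq_true _ _ |>.mp hcond).2
        · intro _
          have hil : i < dp.length := by omega
          simp [List.getD, hil]
      · simp only [hcond]
        refine (ih (j + 2) (by omega)).trans ?_
        constructor
        · rintro ⟨t, ht, h1, h2⟩
          refine ⟨t + 1, by omega, ?_, ?_⟩
          · rw [show j + 2 * (t + 1) = j + 2 + 2 * t by ring]; exact h1
          · rw [show j + 2 * (t + 1) = j + 2 + 2 * t by ring]; exact h2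
        · rintro ⟨t, ht, h1, h2⟩
          cases t with
          | zero =>
            exfalso
            apply hcond
            simp only [Nat.mul_zero, Nat.add_zero] at h1 h2
            rw [Bool.and_eq_true]
            exact ⟨h1, h2⟩
          | succ t =>
            refine ⟨t, by omega, ?_, ?_⟩
            · rw [show j + 2 + 2 * t = j + 2 * (t + 1) by ring]; exact h1
            · rw [show j + 2 + 2 * t = j + 2 * (t + 1) by ring]; exact h2
    · simp only [hji, if_false]
      rw [hfalse]
      constructor
      · intro h; exact absurd h (by simp)
      · rintro ⟨t, ht, _⟩
        exfalso
        exact hji ⟨by omega, by omega⟩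

theorem pvSlice_eq (l : List Char) (a b : Nat) :
    PySem.List.slice l (some ((a : Nat) : Int)) (some ((b : Nat) : Int)) = (l.take b).drop a := by
  rw [PySem.List.slice_natCast, List.drop_take]

theorem pvStep_iff (l : List Char) (i : Nat) (hi1 : 1 ≤ i) (hin : i ≤ l.length)
    (dp : List Bool) (hdp : ∀ m, m < i → (dp.getD m false = true ↔ PvUnits (l.take m))) :
    ((∃ t, 3 + 2 * t ≤ i ∧ dp.getD (i - (3 + 2 * t)) false = true ∧
        pvIsRepUnit (PySem.List.slice l (some ((i - (3 + 2 * t) : Nat) : Int)) (some (i : Int))) = true)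
      ↔ PvUnits (l.take i)) := by
  constructor
  · rintro ⟨t, ht, h1, h2⟩
    set j := 3 + 2 * t with hj
    rw [pvSlice_eq, pvIsRepUnit_iff] at h2
    have hu : PvUnits (l.take (i - j)) := (hdp (i - j) (by omega)).mp h1
    have htake : l.take (i - j) = (l.take i).take (i - j) := by
      rw [List.take_take, min_eq_left (by omega)]
    have hsplit : l.take i = l.take (i - j) ++ (l.take i).drop (i - j) := by
      rw [htake, List.take_append_drop]
    rw [hsplit]
    exact PvUnits.snoc _ _ (htake ▸ hu) h2
  · intro h
    have hne : l.take i ≠ [] := by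
      intro hnil
      have := congrArg List.length hnil
      simp [min_eq_left hin] at this
      omega
    obtain ⟨v, k, hv, hvk⟩ := pvUnits_last h hne
    have hlenu : ('M' :: pvITs (k + 1)).length = 2 * k + 3 := by
      simp [pvITs_length]
      omega
    have hlen : v.length + (2 * k + 3) = i := by
      have := congrArg List.length hvk
      simp [min_eq_left hin, hlenu] at this
      omega
    refine ⟨k, by omega, ?_, ?_⟩
    · have hveq : v = l.take (i - (3 + 2 * k)) := by
        have : v = (l.take i).take v.length := by
          rw [hvk, List.take_left']
          rfl
        rw [this, List.take_take, min_eq_left (by omega), show v.length = i - (3 + 2 * k) by omega]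
      rw [hdp (i - (3 + 2 * k)) (by omega)]
      rw [← hveq]
      exact hv
    · rw [pvSlice_eq, pvIsRepUnit_iff]
      have : (l.take i).drop (i - (3 + 2 * k)) = 'M' :: pvITs (k + 1) := by
        rw [hvk, show i - (3 + 2 * k) = v.length by omega, List.drop_left' rfl]
      rw [this]
      exact ⟨k, rfl⟩

theorem pvOuter (l : List Char) (k : Nat) (hk : k ≤ l.length) :
    (((List.range' 1 k).foldl (fun dp i => pvInnerLoop l l.length i dp 3)
        ((List.replicate (l.length + 1) false).set 0 true)).length = l.length + 1) ∧
    (∀ m, m ≤ l.length →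
      (((List.range' 1 k).foldl (fun dp i => pvInnerLoop l l.length i dp 3)
          ((List.replicate (l.length + 1) false).set 0 true)).getD m false = true
        ↔ m ≤ k ∧ PvUnits (l.take m))) := by
  induction k with
  | zero =>
    refine ⟨by simp, ?_⟩
    intro m hm
    simp only [List.range'_zero, List.foldl_nil]
    cases m with
    | zero =>
      simp [List.getD]
      exact PvUnits.nil
    | succ m =>
      rw [List.getD, List.getElem?_set_ne (by omega), List.getElem?_replicate]
      constructor
      · intro h
        split at h <;> simp_all
      · rintro ⟨h, -⟩; omega
  | succ k ih =>
    obtain ⟨ihlen, ihval⟩ := ih (by omega)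
    rw [List.range'_concat, List.foldl_append, List.foldl_cons, List.foldl_nil]
    simp only [Nat.one_mul]
    set dpk := (List.range' 1 k).foldl (fun dp i => pvInnerLoop l l.length i dp 3)
        ((List.replicate (l.length + 1) false).set 0 true) with hdpk
    refine ⟨by rw [pvInnerLoop_length]; exact ihlen, ?_⟩
    intro m hm
    by_cases hmk : m = 1 + k
    · subst hmk
      have hfalse : dpk.getD (1 + k) false = false := by
        cases h : dpk.getD (1 + k) false
        · rfl
        · exfalso
          have := (ihval (1 + k) hm).mp h
          omega
      rw [pvInnerLoop_self l l.length (1 + k) dpk 3 (by omega) ihlen hfalse]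
      have hdp : ∀ m', m' < 1 + k → (dpk.getD m' false = true ↔ PvUnits (l.take m')) := by
        intro m' hm'
        rw [ihval m' (by omega)]
        constructor
        · rintro ⟨-, h⟩; exact h
        · intro h; exact ⟨by omega, h⟩
      rw [pvStep_iff l (1 + k) (by omega) (by omega) dpk hdp]
      constructor
      · intro h; exact ⟨by omega, h⟩
      · rintro ⟨-, h⟩; exact h
    · rw [pvInnerLoop_ne l l.length (1 + k) dpk 3 m hmk]
      rw [ihval m hm]
      constructor
      · rintro ⟨h, hu⟩; exact ⟨by omega, hu⟩
      · rintro ⟨h, hu⟩; exact ⟨by omega, hu⟩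

theorem pvA_iff (s : String) : can_split_into_repetitive s = true ↔ PvUnits s.toList := by
  unfold can_split_into_repetitive
  obtain ⟨-, hval⟩ := pvOuter s.toList s.toList.length (le_refl _)
  rw [hval s.toList.length (le_refl _)]
  rw [List.take_length]
  simp

theorem pvDfa_ITs (k : Nat) : (pvITs k).foldl pvDfaStep 3 = 3 := by
  induction k with
  | zero => rfl
  | succ k ih => simpa [pvITs, pvDfaStep] using ih

theorem pvDfa_unit (st : Int) (hst : st = 0 ∨ st = 3) (k : Nat) :
    ('M' :: pvITs (k + 1)).foldl pvDfaStep st = 3 := by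
  rcases hst with rfl | rfl <;>
    simpa [pvITs, pvDfaStep] using pvDfa_ITs k

theorem pvDfa_complete {w : List Char} (h : PvUnits w) :
    w.foldl pvDfaStep 0 = 0 ∨ w.foldl pvDfaStep 0 = 3 := by
  induction h with
  | nil => left; rfl
  | snoc v u hv hu ih =>
    right
    obtain ⟨k, rfl⟩ := hu
    rw [List.foldl_append]
    exact pvDfa_unit _ ih k

def PvDInv (w : List Char) (st : Int) : Prop :=
  (st = 0 → w = []) ∧
  (st = 1 → ∃ v, PvUnits v ∧ w = v ++ ['M']) ∧
  (st = 2 → ∃ v k, PvUnits v ∧ w = v ++ 'M' :: (pvITs k ++ ['I'])) ∧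
  (st = 3 → PvUnits w ∧ w ≠ [])

theorem pvDfa_inv (w : List Char) : PvDInv w (w.foldl pvDfaStep 0) := by
  induction w using List.reverseRecOn with
  | nil =>
    exact ⟨fun _ => rfl, fun h => absurd h (by norm_num), fun h => absurd h (by norm_num),
      fun h => absurd h (by norm_num)⟩
  | append_singleton w c ih =>
    rw [List.foldl_append, List.foldl_cons, List.foldl_nil]
    obtain ⟨i0, i1, i2, i3⟩ := ih
    set st := w.foldl pvDfaStep 0 with hst
    by_cases h0 : st = 0
    · have hw : w = [] := i0 h0
      rw [h0]
      by_cases hc : c = 'M'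
      · subst hc
        have hstep : pvDfaStep 0 'M' = 1 := by simp [pvDfaStep]
        rw [hstep]
        exact ⟨fun h => absurd h (by norm_num), fun _ => ⟨[], PvUnits.nil, by rw [hw]⟩,
          fun h => absurd h (by norm_num), fun h => absurd h (by norm_num)⟩
      · have hstep : pvDfaStep 0 c = -1 := by simp [pvDfaStep, hc]
        rw [hstep]
        exact ⟨fun h => absurd h (by norm_num), fun h => absurd h (by norm_num),
          fun h => absurd h (by norm_num), fun h => absurd h (by norm_num)⟩
    · by_cases h1 : st = 1
      · obtain ⟨v, hv, hw⟩ := i1 h1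
        rw [h1]
        by_cases hc : c = 'I'
        · subst hc
          have hstep : pvDfaStep 1 'I' = 2 := by simp [pvDfaStep]
          rw [hstep]
          refine ⟨fun h => absurd h (by norm_num), fun h => absurd h (by norm_num),
            fun _ => ⟨v, 0, hv, ?_⟩, fun h => absurd h (by norm_num)⟩
          rw [hw]; simp [pvITs]
        · have hstep : pvDfaStep 1 c = -1 := by simp [pvDfaStep, hc]
          rw [hstep]
          exact ⟨fun h => absurd h (by norm_num), fun h => absurd h (by norm_num),
            fun h => absurd h (by norm_num), fun h => absurd h (by norm_num)⟩
      · by_cases h2 : st = 2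
        · obtain ⟨v, k, hv, hw⟩ := i2 h2
          rw [h2]
          by_cases hc : c = 'T'
          · subst hc
            have hstep : pvDfaStep 2 'T' = 3 := by simp [pvDfaStep]
            rw [hstep]
            refine ⟨fun h => absurd h (by norm_num), fun h => absurd h (by norm_num),
              fun h => absurd h (by norm_num), fun _ => ⟨?_, by simp⟩⟩
            have heq : (v ++ 'M' :: (pvITs k ++ ['I'])) ++ ['T'] = v ++ 'M' :: pvITs (k + 1) := by
              rw [← pvITs_append k]; simp
            rw [hw, heq]
            exact PvUnits.snoc v _ hv ⟨k, rfl⟩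
          · have hstep : pvDfaStep 2 c = -1 := by simp [pvDfaStep, hc]
            rw [hstep]
            exact ⟨fun h => absurd h (by norm_num), fun h => absurd h (by norm_num),
              fun h => absurd h (by norm_num), fun h => absurd h (by norm_num)⟩
        · by_cases h3 : st = 3
          · obtain ⟨hw, hwne⟩ := i3 h3
            obtain ⟨v, k, hv, hweq⟩ := pvUnits_last hw hwne
            rw [h3]
            by_cases hc : c = 'I'
            · subst hc
              have hstep : pvDfaStep 3 'I' = 2 := by simp [pvDfaStep]
              rw [hstep]
              refine ⟨fun h => absurd h (by norm_num), fun h => absurd h (by norm_num),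
                fun _ => ⟨v, k + 1, hv, ?_⟩, fun h => absurd h (by norm_num)⟩
              rw [hweq, ← pvITs_append k]
              simp
            · by_cases hc' : c = 'M'
              · subst hc'
                have hstep : pvDfaStep 3 'M' = 1 := by simp [pvDfaStep]
                rw [hstep]
                exact ⟨fun h => absurd h (by norm_num), fun _ => ⟨w, hw, rfl⟩,
                  fun h => absurd h (by norm_num), fun h => absurd h (by norm_num)⟩
              · have hstep : pvDfaStep 3 c = -1 := by simp [pvDfaStep, hc, hc']
                rw [hstep]
                exact ⟨fun h => absurd h (by norm_num), fun h => absurd h (by norm_num),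
                  fun h => absurd h (by norm_num), fun h => absurd h (by norm_num)⟩
          · have hstep : pvDfaStep st c = st := by
              simp [pvDfaStep, h0, h1, h2, h3]
            rw [hstep]
            exact ⟨fun h => absurd h h0, fun h => absurd h h1, fun h => absurd h h2,
              fun h => absurd h h3⟩

theorem pvAlt_iff (s : String) : can_split_into_repetitive_alt s = true ↔ PvUnits s.toList := by
  unfold can_split_into_repetitive_alt
  simp only [Bool.or_eq_true, beq_iff_eq]
  constructor
  · rintro (h | h)
    · rw [(pvDfa_inv s.toList).1 h]; exact PvUnits.nil
    · exact ((pvDfa_inv s.toList).2.2.2 h).1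
  · exact pvDfa_complete

-- ===== VERDICT (by name: the statement is the Claim_ definition above) =====
theorem can_split_into_repetitive_spec : Claim_equal_can_split_into_repetitive := by
  intro s _
  unfold Spec_can_split_into_repetitive
  have hA := pvA_iff s
  have hB := pvAlt_iff s
  cases hA' : can_split_into_repetitive s <;> cases hB' : can_split_into_repetitive_alt s <;> simp_all
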